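-- pv_equiv track=rewrite | github.com/Dloyr/Bataille_navale | server_bataille_navale.py | ajuster_grille
-- ===== SOURCE A (Python) =====
-- def ajuster_grille(grille):
--     """
--     Cette fonction prend une grille (liste de listes) et la redimensionne à 10x10.
--     Si la grille a moins de 10 lignes ou colonnes, elle sera complétée avec des ".".
--     Si elle a plus de lignes ou de colonnes, elle sera tronquée.
--     """
--     # Compléter ou tronquer les lignes à 10 caractères
--     grille = [ligne[:10] for ligne in grille]  # Tronque les lignes trop longues
--     grille = [ligne + ['.'] * (10 - len(ligne)) for ligne in grille]  # Complète les lignes trop courtes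
--
--     # Compléter ou tronquer le nombre de lignes à 10
--     if len(grille) < 10:
--         grille.extend([['.'] * 10] * (10 - len(grille)))  # Ajoute des lignes vides
--     else:
--         grille = grille[:10]  # Tronque les lignes excédentaires
--
--     return grille
-- ===== SOURCE B (Python) =====
-- def ajuster_grille(grille):
--     empty = ['.'] * 10
--     def fit(row, n):
--         # recursively take the next cell (or '.') until exactly n cells are produced
--         if n == 0:
--             return []
--         if row:
--             return [row[0]] + fit(row[1:], n - 1)
--         return ['.'] + fit(row, n - 1)
--     def go(rows, n):
--         if n == 0:
--             return []
--         if rows: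
--             return [fit(rows[0], 10)] + go(rows[1:], n - 1)
--         return [empty] + go(rows, n - 1)
--     return go(grille, 10)
-- ===== Notes on version B (the rewrite author's own statement) =====
-- stated objective: alternative
-- what changed: Replaces A's staged slicing/padding passes (slice rows, pad rows, then extend or slice the row list) with a cell-by-cell structural recursion that emits exactly 10 rows of exactly 10 cells, consuming the input as it goes and sharing one empty row for padding.
import Mathlib
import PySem

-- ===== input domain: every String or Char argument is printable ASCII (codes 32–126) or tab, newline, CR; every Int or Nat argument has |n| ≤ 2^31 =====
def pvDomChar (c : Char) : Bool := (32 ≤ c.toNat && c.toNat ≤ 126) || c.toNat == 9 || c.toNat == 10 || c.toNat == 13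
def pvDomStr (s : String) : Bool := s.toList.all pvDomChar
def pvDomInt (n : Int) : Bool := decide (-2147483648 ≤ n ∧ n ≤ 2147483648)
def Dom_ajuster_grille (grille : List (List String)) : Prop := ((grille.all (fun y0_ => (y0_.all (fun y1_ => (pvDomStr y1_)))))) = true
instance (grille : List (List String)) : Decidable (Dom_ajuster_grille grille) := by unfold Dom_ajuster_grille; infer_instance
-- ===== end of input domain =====

-- B replaces A's staged slicing/padding passes with a cell-by-cell structural recursion emitting exactly 10x10; objective: alternative.

-- ===== PORT A =====
def ajuster_grille (grille : List (List String)) : List (List String) :=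
  -- grille = [ligne[:10] for ligne in grille]
  let g1 := grille.map (fun ligne => PySem.List.slice ligne none (some 10))
  -- grille = [ligne + ['.'] * (10 - len(ligne)) for ligne in grille]
  let g2 := g1.map (fun ligne => ligne ++ List.replicate (10 - ligne.length) ".")
  if g2.length < 10 then
    g2 ++ List.replicate (10 - g2.length) (List.replicate 10 ".")
  else
    PySem.List.slice g2 none (some 10)

-- ===== PORT B =====
-- fit(row, n): emit the next cell of row (or '.') until n cells are produced
def pvFit : List String → Nat → List String
  | _, 0 => []
  | [], n + 1 => "." :: pvFit [] n
  | x :: xs, n + 1 => x :: pvFit xs n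

-- go(rows, n): emit the next fitted row (or the shared empty row) until n rows are produced
def pvGo (empty : List String) : List (List String) → Nat → List (List String)
  | _, 0 => []
  | [], n + 1 => empty :: pvGo empty [] n
  | r :: rs, n + 1 => pvFit r 10 :: pvGo empty rs n

def ajuster_grille_alt (grille : List (List String)) : List (List String) :=
  pvGo (List.replicate 10 ".") grille 10

-- ===== PRECONDITION & SPEC =====
def Spec_ajuster_grille (grille : List (List String)) (out : List (List String)) : Prop := out = ajuster_grille_alt grille
instance (grille : List (List String)) (out : List (List String)) : Decidable (Spec_ajuster_grille grille out) := by unfold Spec_ajuster_grille; infer_instance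

-- ===== CLAIM (what is proved, stated in full; the proofs are below) =====
def Claim_equal_ajuster_grille : Prop := ∀ (grille : List (List String)), Dom_ajuster_grille grille → Spec_ajuster_grille grille (ajuster_grille grille)

-- ===== LEMMAS AND PROOFS =====

theorem pvFit_eq (row : List String) (n : Nat) :
    pvFit row n = row.take n ++ List.replicate (n - row.length) "." := by
  induction n generalizing row with
  | zero => simp [pvFit]
  | succ n ih =>
    cases row with
    | nil => simp [pvFit, ih, List.replicate_succ]
    | cons x xs => simp [pvFit, ih]

theorem pvGo_eq (empty : List String) (rs : List (List String)) (n : Nat) :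
    pvGo empty rs n = (rs.take n).map (fun r => pvFit r 10) ++ List.replicate (n - rs.length) empty := by
  induction n generalizing rs with
  | zero => simp [pvGo]
  | succ n ih =>
    cases rs with
    | nil => simp [pvGo, ih, List.replicate_succ]
    | cons r rs => simp [pvGo, ih]

theorem fitted_eq (r : List String) :
    pvFit r 10 = PySem.List.slice r none (some 10) ++
      List.replicate (10 - (PySem.List.slice r none (some 10)).length) "." := by
  rw [pvFit_eq, PySem.List.slice_to _ (by norm_num : (0:Int) ≤ 10)]
  have h10 : (10:Int).toNat = 10 := rfl
  rw [h10]
  congr 1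
  rw [List.length_take]
  congr 1
  omega

-- ===== VERDICT (by name: the statement is the Claim_ definition above) =====
theorem ajuster_grille_spec : Claim_equal_ajuster_grille := by
  intro grille _
  unfold Spec_ajuster_grille ajuster_grille ajuster_grille_alt
  rw [pvGo_eq]
  simp only [List.map_map]
  by_cases h : grille.length < 10
  · rw [if_pos (by simpa using h)]
    have ht : grille.take 10 = grille := List.take_of_length_le (by omega)
    rw [ht]
    congr 1
    · simp [Function.comp, fitted_eq]
    · simp
  · rw [if_neg (by simpa using h)]
    rw [PySem.List.slice_to _ (by norm_num : (0:Int) ≤ 10)]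
    have : (10 : Nat) - grille.length = 0 := by omega
    rw [this, List.replicate_zero, List.append_nil]
    have h10 : (10:Int).toNat = 10 := rfl
    rw [h10]
    simp [Function.comp_def, fitted_eq]
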